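-- pv_equiv track=rewrite | github.com/karenhaag/textmining2017 | clustering.py | dic_construct
-- ===== SOURCE A (Python) =====
-- lemmaDict = {}
--
-- def lemmatize(word):
--     return lemmaDict.get(word, word) # + u'*'
--
-- def dic_construct(words, lemm):
--     dicWords = {} #diccionario que tiene clave: palabra, value: index en la lista
--     list_index = [] #Lista de indices
--     for word in words:
--         if lemm:
--             w = lemmatize( word.lower()) #Lematiza
--         else:
--             w = word.lower()
--         if dicWords.get(w, -1) < 0: #no esta en dic
--             len_dic = len(dicWords)
--             dicWords[w] = len_dic
--             list_index.append(w)
--     return(dicWords, list_index)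
-- ===== SOURCE B (Python) =====
-- lemmaDict = {}
--
-- def lemmatize(word):
--     return lemmaDict.get(word, word)
--
-- def dic_construct(words, lemm):
--     transformed = [lemmatize(w.lower()) if lemm else w.lower() for w in words]
--
--     # first-occurrence dedup by repeated filtering: take the head of what is
--     # left, then drop every later copy of it before continuing
--     list_index = []
--     rest = transformed
--     while rest:
--         h = rest[0]
--         list_index.append(h)
--         rest = [x for x in rest[1:] if x != h]
--
--     dicWords = dict(zip(list_index, range(len(list_index))))
--     return (dicWords, list_index)
-- ===== Notes on version B (the rewrite author's own statement) =====
-- stated objective: alternative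
-- what changed: Replaces A's single guarded loop that maintains dicWords[w]=len(dicWords) with: transform all words, dedup by repeatedly taking the head of the remaining list and filtering out its copies, then build the dict at once with dict(zip(unique, range(n))).
import Mathlib
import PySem

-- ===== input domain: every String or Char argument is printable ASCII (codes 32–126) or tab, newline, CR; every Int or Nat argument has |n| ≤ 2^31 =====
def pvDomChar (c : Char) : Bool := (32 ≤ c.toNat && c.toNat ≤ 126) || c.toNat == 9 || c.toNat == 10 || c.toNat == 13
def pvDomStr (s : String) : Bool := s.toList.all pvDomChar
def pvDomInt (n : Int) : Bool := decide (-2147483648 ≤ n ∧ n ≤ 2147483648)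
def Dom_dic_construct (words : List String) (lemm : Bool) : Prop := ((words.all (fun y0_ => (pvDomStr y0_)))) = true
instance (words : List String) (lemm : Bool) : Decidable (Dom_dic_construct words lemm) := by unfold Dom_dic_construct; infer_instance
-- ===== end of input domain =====

-- B dedups by repeatedly taking the head and filtering its copies out of the rest, and builds
-- the dict at once from zip(unique, range(n)) instead of A's guarded one-pass loop; same result.

-- ===== PORT A =====
-- module context: lemmaDict = {} and lemmatize (used by both versions)
def lemmaDict : PySem.Dict String String := PySem.Dict.empty
def lemmatize (word : String) : String := lemmaDict.getD word word

def dic_construct (words : List String) (lemm : Bool) : (List (String × Int)) × List String :=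
  let st := words.foldl
    (fun (st : PySem.Dict String Int × List String) word =>
      let w := if lemm then lemmatize (PySem.Str.lower word) else PySem.Str.lower word
      if st.1.getD w (-1) < 0 then
        let len_dic : Int := st.1.size
        (st.1.insert w len_dic, st.2 ++ [w])
      else st)
    (PySem.Dict.empty, [])
  (st.1.items, st.2)

-- ===== PORT B =====
-- uniq: Source B's while-loop that repeatedly takes the head and filters its copies out of the rest, written as the equivalent shrinking-list recursion
def uniqB : List String → List String
  | [] => []
  | h :: xs => h :: uniqB (xs.filter (fun x => x ≠ h))
termination_by xs => xs.length
decreasing_by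
  have h1 := List.length_filter_le (fun x : {x // x ∈ xs} => !decide (↑x = h)) xs.attach
  simpa using le_trans h1 (by simp)

def dic_construct_alt (words : List String) (lemm : Bool) : (List (String × Int)) × List String :=
  let transformed := words.map
    (fun w => if lemm then lemmatize (PySem.Str.lower w) else PySem.Str.lower w)
  let list_index := uniqB transformed
  let dicWords := PySem.Dict.ofList
    (list_index.zip (PySem.List.pyRange 0 (list_index.length : Int) 1))
  (dicWords.items, list_index)

-- ===== PRECONDITION & SPEC =====
def Spec_dic_construct (words : List String) (lemm : Bool) (out : (List (String × Int)) × List String) : Prop := out = dic_construct_alt words lemm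
instance (words : List String) (lemm : Bool) (out : (List (String × Int)) × List String) : Decidable (Spec_dic_construct words lemm out) := by unfold Spec_dic_construct; infer_instance

-- ===== CLAIM (what is proved, stated in full; the proofs are below) =====
def Claim_equal_dic_construct : Prop := ∀ (words : List String) (lemm : Bool), Dom_dic_construct words lemm → Spec_dic_construct words lemm (dic_construct words lemm)

-- ===== LEMMAS AND PROOFS =====

-- the dict A maintains, characterised: keys in first-insertion order, value = index
def dictOf (li : List String) : PySem.Dict String Int :=
  PySem.Dict.mk ((PySem.List.enumerate li).map (fun p => (p.2, p.1)))

lemma get?_dictOf_from (li : List String) (w : String) (s : Int) (hw : w ∉ li) :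
    (PySem.Dict.mk ((PySem.List.enumerate li s).map (fun p => (p.2, p.1)))).get? w = none := by
  induction li generalizing s with
  | nil => simp [PySem.List.enumerate_nil, PySem.Dict.get?]
  | cons x xs ih =>
    rw [PySem.List.enumerate_cons]
    simp only [List.map_cons, PySem.Dict.get?_mk_cons]
    have hx : x ≠ w := fun h => hw (h ▸ List.mem_cons_self)
    simp [hx, ih _ (fun h => hw (List.mem_cons_of_mem _ h))]

lemma getD_dictOf_from_nonneg (li : List String) (w : String) (s : Int) (hs : 0 ≤ s)
    (hw : w ∈ li) :
    0 ≤ (PySem.Dict.mk ((PySem.List.enumerate li s).map (fun p => (p.2, p.1)))).getD w (-1) := by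
  induction li generalizing s with
  | nil => cases hw
  | cons x xs ih =>
    rw [PySem.List.enumerate_cons]
    simp only [List.map_cons]
    rw [PySem.Dict.getD_eq_get?_getD, PySem.Dict.get?_mk_cons]
    by_cases hx : x = w
    · simp [hx, hs]
    · rcases List.mem_cons.mp hw with h | h
      · exact absurd h.symm hx
      · exact (by simpa [hx, ← PySem.Dict.getD_eq_get?_getD] using ih _ (by omega) h)

lemma size_dictOf (li : List String) : (dictOf li).size = li.length := by
  simp [dictOf, PySem.Dict.size, PySem.List.length_enumerate]

lemma insert_dictOf_fresh (li : List String) (w : String) (hw : w ∉ li) :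
    (dictOf li).insert w (li.length : Int) = dictOf (li ++ [w]) := by
  have hc : (dictOf li).contains w = false := by
    rw [PySem.Dict.contains_eq_isSome_get?]
    rw [show (dictOf li).get? w = none from get?_dictOf_from li w 0 hw]
    rfl
  apply PySem.Dict.ext
  rw [PySem.Dict.items_insert_of_not_contains (h := hc)]
  simp [dictOf, PySem.List.enumerate_append, PySem.List.enumerate_cons,
    PySem.List.enumerate_nil]

-- A's loop over the transformed words, started from any consistent state
lemma loop_dictOf (ts li : List String) (hnd : li.Nodup) :
    ts.foldl
      (fun (st : PySem.Dict String Int × List String) w =>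
        if st.1.getD w (-1) < 0 then
          (st.1.insert w (st.1.size : Int), st.2 ++ [w])
        else st)
      (dictOf li, li)
    = (dictOf (PySem.Set.update li ts), PySem.Set.update li ts) := by
  induction ts generalizing li with
  | nil => simp [PySem.Set.update_nil]
  | cons t ts ih =>
    rw [PySem.Set.update_cons, List.foldl_cons]
    by_cases ht : t ∈ li
    · have h1 : ¬ (dictOf li).getD t (-1) < 0 := by
        have := getD_dictOf_from_nonneg li t 0 le_rfl ht
        simp only [dictOf]; omega
      rw [if_neg h1, PySem.Set.add_of_mem ht]
      exact ih li hnd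
    · have h1 : (dictOf li).getD t (-1) < 0 := by
        rw [PySem.Dict.getD_eq_get?_getD]
        rw [show (dictOf li).get? t = none from get?_dictOf_from li t 0 ht]
        norm_num [Option.getD]
      rw [if_pos h1, size_dictOf, insert_dictOf_fresh li t ht, PySem.Set.add_of_not_mem ht]
      exact ih (li ++ [t]) (by simp [List.nodup_append, hnd]; exact fun a ha h => ht (h ▸ ha))

-- discarding commutes with ofList through filter
lemma discard_ofList (xs : List String) (x : String) :
    (PySem.Set.ofList xs).discard x
      = PySem.Set.ofList (xs.filter (fun y => !(y == x))) := by
  induction xs with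
  | nil => rfl
  | cons y ys ih =>
    rw [PySem.Set.ofList_cons]
    by_cases hy : y = x
    · subst hy
      have hL : PySem.Set.discard (PySem.Set.discard (PySem.Set.ofList ys) y) y
          = PySem.Set.discard (PySem.Set.ofList ys) y := by
        simp [PySem.Set.discard, List.filter_filter]
      calc PySem.Set.discard (y :: PySem.Set.discard (PySem.Set.ofList ys) y) y
          = PySem.Set.discard (PySem.Set.discard (PySem.Set.ofList ys) y) y := by
            simp [PySem.Set.discard]
        _ = PySem.Set.discard (PySem.Set.ofList ys) y := hL
        _ = PySem.Set.ofList (ys.filter (fun z => !(z == y))) := ih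
        _ = PySem.Set.ofList ((y :: ys).filter (fun z => !(z == y))) := by
            simp
    · have hcomm : PySem.Set.discard (PySem.Set.discard (PySem.Set.ofList ys) y) x
          = PySem.Set.discard (PySem.Set.discard (PySem.Set.ofList ys) x) y := by
        simp [PySem.Set.discard, List.filter_filter, Bool.and_comm]
      calc PySem.Set.discard (y :: PySem.Set.discard (PySem.Set.ofList ys) y) x
          = y :: PySem.Set.discard (PySem.Set.discard (PySem.Set.ofList ys) y) x := by
            simp [PySem.Set.discard, hy]
        _ = y :: PySem.Set.discard (PySem.Set.discard (PySem.Set.ofList ys) x) y := by rw [hcomm]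
        _ = y :: PySem.Set.discard (PySem.Set.ofList (ys.filter (fun z => !(z == x)))) y := by rw [ih]
        _ = PySem.Set.ofList (y :: ys.filter (fun z => !(z == x))) := by
            rw [PySem.Set.ofList_cons]
        _ = PySem.Set.ofList ((y :: ys).filter (fun z => !(z == x))) := by
            simp [hy]

-- B's recursive dedup computes set(...) in first-occurrence order
lemma uniqB_eq_ofList_aux : ∀ (n : Nat) (xs : List String), xs.length ≤ n →
    uniqB xs = PySem.Set.ofList xs := by
  intro n
  induction n with
  | zero =>
    intro xs h
    rw [List.length_eq_zero_iff.mp (Nat.le_zero.mp h)]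
    simp [uniqB]
  | succ n ih =>
    intro xs h
    cases xs with
    | nil => simp [uniqB]
    | cons x ys =>
      have hpred : (fun y : String => decide (y ≠ x)) = (fun y => !(y == x)) := by
        funext y; by_cases h : y = x <;> simp [h]
      rw [uniqB, PySem.Set.ofList_cons, discard_ofList]
      have hlen : (ys.filter (fun y => y ≠ x)).length ≤ n :=
        le_trans (List.length_filter_le _ _) (by simpa using h)
      rw [ih _ hlen]
      simp only [hpred]

lemma uniqB_eq_ofList (xs : List String) : uniqB xs = PySem.Set.ofList xs :=
  uniqB_eq_ofList_aux xs.length xs le_rfl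

-- zip(unique, range) is enumerate swapped
lemma zip_pyRange_aux (li : List String) (s : Int) :
    li.zip (PySem.List.pyRange s (s + (li.length : Int)) 1)
      = (PySem.List.enumerate li s).map (fun p => (p.2, p.1)) := by
  induction li generalizing s with
  | nil => simp [PySem.List.enumerate_nil, PySem.List.pyRange]
  | cons x xs ih =>
    have hb : s + (((x :: xs).length : Nat) : Int) = (s + 1) + (xs.length : Int) := by
      push_cast [List.length_cons]; ring
    have hlt : s < s + (((x :: xs).length : Nat) : Int) := by
      push_cast [List.length_cons]; omega
    rw [PySem.List.enumerate_cons, PySem.List.pyRange_one_cons hlt, hb]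
    simp only [List.zip_cons_cons, List.map_cons]
    rw [ih (s + 1)]

lemma zip_pyRange_eq_enumerate (li : List String) :
    li.zip (PySem.List.pyRange 0 (li.length : Int) 1)
      = (PySem.List.enumerate li).map (fun p => (p.2, p.1)) := by
  simpa using zip_pyRange_aux li 0

-- Dict.update with fresh nodup keys appends the pairs as items
lemma items_update_fresh (l : List (String × Int)) (d : PySem.Dict String Int)
    (hnd : (l.map Prod.fst).Nodup) (hd : ∀ p ∈ l, d.contains p.1 = false) :
    (d.update l).items = d.items ++ l := by
  induction l generalizing d with
  | nil => simp [PySem.Dict.update]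
  | cons p l ih =>
    have hc : d.contains p.1 = false := hd p List.mem_cons_self
    have step : d.update (p :: l) = (d.insert p.1 p.2).update l := rfl
    rw [List.map_cons] at hnd
    have h2 := List.nodup_cons.mp hnd
    rw [step, ih (d.insert p.1 p.2) h2.2
      (fun q hq => by
        rw [PySem.Dict.contains_insert]
        have hne : q.1 ≠ p.1 := by
          intro h
          exact h2.1 (h ▸ List.mem_map_of_mem hq)
        simp [hne, hd q (List.mem_cons_of_mem _ hq)]),
      PySem.Dict.items_insert_of_not_contains d p.2 hc]
    simp

-- Dict.ofList of nodup-keyed pairs has exactly those items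
lemma items_ofList_nodup (l : List (String × Int)) (h : (l.map Prod.fst).Nodup) :
    (PySem.Dict.ofList l).items = l := by
  have := items_update_fresh l PySem.Dict.empty h (fun p _ => rfl)
  simpa [PySem.Dict.ofList] using this

-- ===== VERDICT (by name: the statement is the Claim_ definition above) =====
theorem dic_construct_spec : Claim_equal_dic_construct := by
  intro words lemm _
  unfold Spec_dic_construct dic_construct dic_construct_alt
  simp only []
  rw [← List.foldl_map
    (f := fun word => if lemm = true then lemmatize (PySem.Str.lower word) else PySem.Str.lower word)
    (g := fun (st : PySem.Dict String Int × List String) w =>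
      if st.1.getD w (-1) < 0 then (st.1.insert w (st.1.size : Int), st.2 ++ [w]) else st)]
  have h := loop_dictOf
    (words.map (fun word => if lemm = true then lemmatize (PySem.Str.lower word) else PySem.Str.lower word))
    [] List.nodup_nil
  rw [PySem.Set.update_nil_left] at h
  rw [show (PySem.Dict.empty : PySem.Dict String Int) = dictOf [] from rfl, h]
  set u := PySem.Set.ofList (words.map (fun word => if lemm = true then lemmatize (PySem.Str.lower word) else PySem.Str.lower word)) with hu
  rw [uniqB_eq_ofList, ← hu, zip_pyRange_eq_enumerate,
    items_ofList_nodup _ (by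
      rw [List.map_map]
      have he : ((PySem.List.enumerate u).map (Prod.fst ∘ fun p => (p.2, p.1))) = u := by
        rw [show (Prod.fst ∘ fun p : Int × String => (p.2, p.1)) = (fun p => p.2) from rfl]
        exact PySem.List.map_snd_enumerate u 0
      rw [he, hu]
      exact PySem.Set.nodup_ofList _)]
  rfl
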